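-- pv_equiv track=rewrite | github.com/MrBrantCode/unitest_baseline | mut_generate/mist_train_taco/taco_276/solution.py | find_original_dracula
-- ===== SOURCE A (Python) =====
-- def find_original_dracula(N: int) -> int:
--     """
--     Calculate the minimum number of times the balance needs to be used to find the original Dracula
--     from N Draculas in the worst case.
--
--     Parameters:
--     N (int): The total number of Draculas, both original and fake.
--
--     Returns:
--     int: The minimum number of times the balance needs to be used.
--     """
--     n = 1
--     ans = 1
--     while True:
--         n *= 3
--         if n >= N:
--             return ans
--         ans += 1
-- ===== SOURCE B (Python) =====
-- def find_original_dracula(N: int) -> int: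
--     ans = 1
--     m = (N + 2) // 3
--     while m > 1:
--         m = (m + 2) // 3
--         ans += 1
--     return ans
-- ===== Notes on version B (the rewrite author's own statement) =====
-- stated objective: alternative
-- what changed: Instead of growing a power of three up toward N, B repeatedly ceiling-divides the remaining count down to one, counting the steps.
import Mathlib
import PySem

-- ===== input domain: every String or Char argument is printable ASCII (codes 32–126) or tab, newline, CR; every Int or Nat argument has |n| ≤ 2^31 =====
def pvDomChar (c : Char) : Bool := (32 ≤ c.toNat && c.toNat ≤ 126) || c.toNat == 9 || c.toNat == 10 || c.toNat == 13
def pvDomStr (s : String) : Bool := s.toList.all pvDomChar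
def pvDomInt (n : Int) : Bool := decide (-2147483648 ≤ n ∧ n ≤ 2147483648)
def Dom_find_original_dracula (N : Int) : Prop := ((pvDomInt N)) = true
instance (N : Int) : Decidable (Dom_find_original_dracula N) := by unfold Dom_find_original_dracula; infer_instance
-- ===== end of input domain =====

-- B counts ceiling-divisions of the remaining count down to one instead of A's growing a power of three up toward N; alternative decomposition, same cost.

-- ===== PORT A =====
-- A's 'while True' loop: n *= 3; if n >= N return ans; ans += 1.
-- The proof argument 0 < n only makes the recursion total; the computation is A's.
def fodLoopA (N n ans : Int) (hn : 0 < n) : Int :=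
  if _h : n * 3 ≥ N then ans
  else fodLoopA N (n * 3) (ans + 1) (by omega)
termination_by (N - n).toNat
decreasing_by omega

def find_original_dracula (N : Int) : Int := fodLoopA N 1 1 (by omega)

-- ===== PORT B =====
-- B's 'while m > 1' loop: m = (m + 2) // 3; ans += 1.
def fodLoopB (m ans : Int) : Int :=
  if _h : 1 < m then fodLoopB (PySem.Int.floordiv (m + 2) 3) (ans + 1)
  else ans
termination_by m.toNat
decreasing_by
  rw [PySem.Int.floordiv_eq_ediv_of_pos (by omega)]
  omega

def find_original_dracula_alt (N : Int) : Int :=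
  fodLoopB (PySem.Int.floordiv (N + 2) 3) 1

-- ===== PRECONDITION & SPEC =====
def Spec_find_original_dracula (N : Int) (out : Int) : Prop := out = find_original_dracula_alt N
instance (N : Int) (out : Int) : Decidable (Spec_find_original_dracula N out) := by unfold Spec_find_original_dracula; infer_instance

-- ===== CLAIM (what is proved, stated in full; the proofs are below) =====
def Claim_equal_find_original_dracula : Prop := ∀ (N : Int), Dom_find_original_dracula N → Spec_find_original_dracula N (find_original_dracula N)

-- ===== LEMMAS AND PROOFS =====

-- One ceiling-division step of B, characterised by bracketing inequalities.
theorem fod_step_bounds (m : Int) :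
    3 * (PySem.Int.floordiv (m + 2) 3 - 1) < m ∧ m ≤ 3 * PySem.Int.floordiv (m + 2) 3 := by
  rw [PySem.Int.floordiv_eq_ediv_of_pos (by omega)]
  omega

-- Invariant: if c brackets N as the ceiling of N / (3n), the two loops agree.
theorem fod_loop_eq (N n ans c : Int) (hn : 0 < n)
    (h1 : 3 * n * (c - 1) < N) (h2 : N ≤ 3 * n * c) :
    fodLoopA N n ans hn = fodLoopB c ans := by
  fun_induction fodLoopA N n ans hn generalizing c with
  | case1 n ans hn hbase =>
    -- A stops: N ≤ 3n, so c ≤ 1 and B stops too.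
    have hc : ¬ 1 < c := by nlinarith
    rw [fodLoopB, dif_neg hc]
  | case2 n ans hn hrec ih =>
    -- A recurses: 3n < N, so 1 < c and B recurses.
    have hc : 1 < c := by nlinarith
    rw [fodLoopB, dif_pos hc]
    set d := PySem.Int.floordiv (c + 2) 3 with hd
    obtain ⟨hd1, hd2⟩ := fod_step_bounds c
    apply ih
    · nlinarith
    · nlinarith

-- ===== VERDICT (by name: the statement is the Claim_ definition above) =====
theorem find_original_dracula_spec : Claim_equal_find_original_dracula := by
  intro N _
  show _ = _
  unfold find_original_dracula find_original_dracula_alt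
  obtain ⟨h1, h2⟩ := fod_step_bounds N
  exact fod_loop_eq N 1 1 _ (by omega) (by omega) (by omega)
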